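-- pv_equiv track=rewrite | github.com/yeohj0710/wellnessbox-rnd | src/wellnessbox_rnd/domain/catalog.py | _catalog_sequence_tokens
-- ===== SOURCE A (Python) =====
-- def normalize_catalog_text(value: str) -> str:
--     collapsed = value.strip().lower().replace("_", " ").replace("-", " ")
--     return " ".join(collapsed.split())
--
-- def _catalog_sequence_tokens(value: str) -> tuple[str, ...]:
--     tokens: list[str] = []
--     for raw_token in normalize_catalog_text(value).split():
--         cleaned = "".join(char for char in raw_token if char.isalnum())
--         if not cleaned or cleaned.isdigit():
--             continue
--         tokens.append(cleaned)
--     return tuple(tokens)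
-- ===== SOURCE B (Python) =====
-- def _catalog_sequence_tokens(value: str) -> tuple[str, ...]:
--     tokens: list[str] = []
--     buf: list[str] = []
--     for char in value.lower():
--         if char.isspace() or char == "_" or char == "-":
--             if buf and not "".join(buf).isdigit():
--                 tokens.append("".join(buf))
--             buf = []
--         elif char.isalnum():
--             buf.append(char)
--     if buf and not "".join(buf).isdigit():
--         tokens.append("".join(buf))
--     return tuple(tokens)
-- ===== Notes on version B (the rewrite author's own statement) =====
-- stated objective: alternative
-- what changed: Replaces A's multi-pass normalization pipeline (strip, lower, two replace passes, split, join, re-split, per-token filter) with a single left-to-right scan over the lowered string that maintains a current-token buffer of alphanumeric characters and flushes it at separators.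
import Mathlib
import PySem

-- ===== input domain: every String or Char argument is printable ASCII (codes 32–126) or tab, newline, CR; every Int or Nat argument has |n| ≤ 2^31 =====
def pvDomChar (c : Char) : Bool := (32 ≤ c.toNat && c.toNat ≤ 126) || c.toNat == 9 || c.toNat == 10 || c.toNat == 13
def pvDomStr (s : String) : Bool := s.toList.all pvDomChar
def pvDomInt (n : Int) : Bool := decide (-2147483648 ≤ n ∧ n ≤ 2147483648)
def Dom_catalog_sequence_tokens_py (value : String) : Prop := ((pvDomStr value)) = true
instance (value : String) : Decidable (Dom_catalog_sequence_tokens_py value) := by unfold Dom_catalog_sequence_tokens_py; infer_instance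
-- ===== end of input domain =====

-- B replaces A's strip/replace/split normalization pipeline by a single left-to-right scan with a token buffer (different decomposition, same O(n) cost).

-- ===== PORT A =====
def normalize_catalog_text_py (value : String) : String :=
  let collapsed := PySem.Str.replace (PySem.Str.replace (PySem.Str.lower (PySem.Str.strip value)) "_" " ") "-" " "
  PySem.Str.join " " (PySem.Str.split₀ collapsed)

def catalog_sequence_tokens_py (value : String) : List String :=
  (PySem.Str.split₀ (normalize_catalog_text_py value)).foldl
    (fun tokens raw_token =>
      -- cleaned = "".join(char for char in raw_token if char.isalnum()), kept as its char list
      let cleaned := raw_token.toList.filter (fun char => PySem.Chars.isalnum char)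
      if cleaned.isEmpty || PySem.Chars.strIsdigit cleaned then tokens
      else tokens ++ [String.ofList cleaned]) []

-- ===== PORT B =====
def catalog_sequence_tokens_py_alt (value : String) : List String :=
  let step := fun (st : List String × List Char) (char : Char) =>
    if PySem.Chars.isspace char || char == '_' || char == '-' then
      ((if !st.2.isEmpty && !PySem.Chars.strIsdigit st.2 then st.1 ++ [String.ofList st.2] else st.1), ([] : List Char))
    else if PySem.Chars.isalnum char then (st.1, st.2 ++ [char])
    else st
  let fin := (PySem.Str.lower value).toList.foldl step ([], [])
  if !fin.2.isEmpty && !PySem.Chars.strIsdigit fin.2 then fin.1 ++ [String.ofList fin.2] else fin.1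

-- ===== PRECONDITION & SPEC =====
def Spec_catalog_sequence_tokens_py (value : String) (out : List String) : Prop := out = catalog_sequence_tokens_py_alt value
instance (value : String) (out : List String) : Decidable (Spec_catalog_sequence_tokens_py value out) := by unfold Spec_catalog_sequence_tokens_py; infer_instance

-- ===== CLAIM (what is proved, stated in full; the proofs are below) =====
def Claim_equal_catalog_sequence_tokens_py : Prop := ∀ (value : String), Dom_catalog_sequence_tokens_py value → Spec_catalog_sequence_tokens_py value (catalog_sequence_tokens_py value)

-- ===== LEMMAS AND PROOFS =====

-- the per-lowered-char substitution A's two replace calls perform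
def pvSub1 (c : Char) : Char := if c = '_' then ' ' else c
def pvSub2 (c : Char) : Char := if c = '-' then ' ' else c
def pvF (c : Char) : Char := pvSub2 (pvSub1 (PySem.Chars.lowerChar c))

-- accumulator-free form of PySem.Chars.split₀.go
def finishW : List Char → List Char → List (List Char)
  | cur, [] => if cur.isEmpty then [] else [cur.reverse]
  | cur, c :: rest =>
    if PySem.Chars.isspace c then
      (if cur.isEmpty then finishW [] rest else cur.reverse :: finishW [] rest)
    else finishW (c :: cur) rest

-- A's token-collecting loop body / fold
def astep (tokens : List String) (w : List Char) : List String :=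
  if (w.filter (fun char => PySem.Chars.isalnum char)).isEmpty
      || PySem.Chars.strIsdigit (w.filter (fun char => PySem.Chars.isalnum char)) then tokens
  else tokens ++ [String.ofList (w.filter (fun char => PySem.Chars.isalnum char))]

def afold (tokens : List String) (ws : List (List Char)) : List String := ws.foldl astep tokens

-- B's flush and accumulator-free scan
def bemit (buf : List Char) : List String :=
  if !buf.isEmpty && !PySem.Chars.strIsdigit buf then [String.ofList buf] else []

def bfin : List Char → List Char → List String
  | buf, [] => bemit buf
  | buf, c :: rest =>
    if PySem.Chars.isspace c || c == '_' || c == '-' then bemit buf ++ bfin [] rest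
    else if PySem.Chars.isalnum c then bfin (buf ++ [c]) rest
    else bfin buf rest

theorem lowerChar_of_isspace (c : Char) (h : PySem.Chars.isspace c = true) : PySem.Chars.lowerChar c = c := by
  have hA : 'A'.val.toNat = 65 := rfl
  have hZ : 'Z'.val.toNat = 90 := rfl
  simp only [PySem.Chars.lowerChar, PySem.Chars.isspace, PySem.Chars.isupper, Char.le_def,
    UInt32.le_iff_toNat_le, Char.toNat, decide_eq_true_eq, Bool.or_eq_true, Bool.and_eq_true] at *
  split_ifs with hu
  · exfalso; omega
  · rfl

theorem pvF_of_isspace (c : Char) (h : PySem.Chars.isspace c = true) : pvF c = c := by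
  have hl := lowerChar_of_isspace c h
  have h1 : c ≠ '_' := by rintro rfl; exact absurd h (by decide)
  have h2 : c ≠ '-' := by rintro rfl; exact absurd h (by decide)
  simp [pvF, pvSub1, pvSub2, hl, h1, h2]

-- single-character replace is a map
theorem replace_go_single (o n : Char) (s : List Char) : ∀ (fuel : Nat) (acc : List Char), s.length ≤ fuel →
    PySem.Chars.replace.go [o] [n] fuel s acc = acc.reverse ++ s.map (fun c => if c = o then n else c) := by
  induction s with
  | nil => intro fuel acc _; cases fuel <;> simp [PySem.Chars.replace.go]
  | cons c t ih =>
    intro fuel acc hle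
    cases fuel with
    | zero => simp at hle
    | succ k =>
      simp only [PySem.Chars.replace.go]
      by_cases hc : c = o
      · subst hc
        have hp : [c].isPrefixOf (c :: t) = true := by simp [List.isPrefixOf]
        rw [if_pos hp]
        simp only [List.length_cons, List.length_nil, Nat.zero_add, List.drop_succ_cons,
          List.drop_zero, List.reverse_cons, List.reverse_nil, List.nil_append,
          List.singleton_append] at *
        rw [ih k (n :: acc) (by omega)]
        simp
      · have hp : [o].isPrefixOf (c :: t) = false := by simp [List.isPrefixOf]; exact fun h => absurd h.symm hc
        rw [if_neg (by simp [hp])]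
        simp only [List.length_cons] at hle
        rw [ih k (c :: acc) (by omega)]
        simp [hc]

theorem replace_single (o n : Char) (s : List Char) :
    PySem.Chars.replace s [o] [n] = s.map (fun c => if c = o then n else c) := by
  simp [PySem.Chars.replace, replace_go_single o n s s.length [] le_rfl]

theorem split₀_go_eq (s : List Char) : ∀ cur acc, PySem.Chars.split₀.go s cur acc = acc.reverse ++ finishW cur s := by
  induction s with
  | nil => intro cur acc; by_cases h : cur.isEmpty <;> simp [PySem.Chars.split₀.go, finishW, h]
  | cons c t ih =>
    intro cur acc
    simp only [PySem.Chars.split₀.go, finishW]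
    by_cases hs : PySem.Chars.isspace c
    · by_cases hc : cur.isEmpty <;> simp [hs, hc, ih]
    · simp [hs, ih]

theorem split₀_eq_finishW (s : List Char) : PySem.Chars.split₀ s = finishW [] s := by
  simpa using split₀_go_eq s [] []

theorem astep_append (tokens : List String) (w : List Char) : astep tokens w = tokens ++ astep [] w := by
  unfold astep; split_ifs <;> simp

theorem afold_cons (tokens : List String) (w : List Char) (ws : List (List Char)) :
    afold tokens (w :: ws) = tokens ++ astep [] w ++ afold [] ws := by
  have h : ∀ ws tokens, afold tokens ws = tokens ++ afold [] ws := by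
    intro ws
    induction ws with
    | nil => simp [afold]
    | cons v vs ih =>
      intro tokens
      simp only [afold, List.foldl_cons] at *
      rw [ih (astep tokens v), ih (astep [] v), astep_append]
      simp
  simp only [afold, List.foldl_cons] at *
  rw [h ws (astep tokens w), astep_append]

-- leading all-space chunks are ignored by finishW from an empty buffer
theorem finishW_leading_spaces (xs l : List Char) (h : ∀ c ∈ xs, PySem.Chars.isspace c = true) :
    finishW [] (xs ++ l) = finishW [] l := by
  induction xs with
  | nil => simp
  | cons c t ih =>
    have hc := h c (by simp)
    show finishW [] (c :: (t ++ l)) = finishW [] l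
    rw [show finishW [] (c :: (t ++ l)) = finishW [] (t ++ l) by rw [finishW, if_pos hc, if_pos List.isEmpty_nil]]
    exact ih (fun x hx => h x (by simp [hx]))

theorem finishW_all_spaces (xs : List Char) (h : ∀ c ∈ xs, PySem.Chars.isspace c = true) :
    ∀ cur, finishW cur xs = finishW cur [] := by
  induction xs with
  | nil => intro cur; rfl
  | cons c t ih =>
    intro cur
    have hc := h c (by simp)
    have ht := ih (fun x hx => h x (by simp [hx]))
    by_cases hcur : cur.isEmpty
    · have hc0 : cur = [] := List.isEmpty_iff.mp hcur
      subst hc0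
      rw [show finishW [] (c :: t) = finishW [] t by rw [finishW, if_pos hc, if_pos List.isEmpty_nil]]
      rw [ht []]
    · rw [show finishW cur (c :: t) = cur.reverse :: finishW [] t by rw [finishW, if_pos hc, if_neg (by simp [hcur])]]
      rw [ht [], show finishW cur [] = [cur.reverse] by rw [finishW, if_neg (by simp [hcur])]]
      rfl

theorem finishW_trailing_spaces (l : List Char) : ∀ (cur xs : List Char), (∀ c ∈ xs, PySem.Chars.isspace c = true) →
    finishW cur (l ++ xs) = finishW cur l := by
  induction l with
  | nil => intro cur xs h; simpa using finishW_all_spaces xs h cur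
  | cons c t ih =>
    intro cur xs h
    simp only [List.cons_append, finishW]
    by_cases hs : PySem.Chars.isspace c
    · by_cases hc : cur.isEmpty <;> simp [hs, hc, ih _ xs h]
    · simp [hs, ih _ xs h]

-- a whitespace-free word is swallowed whole into the buffer
theorem finishW_word (w : List Char) : ∀ (cur l : List Char), (∀ c ∈ w, PySem.Chars.isspace c = false) →
    finishW cur (w ++ l) = finishW (w.reverse ++ cur) l := by
  induction w with
  | nil => intro cur l _; simp
  | cons c t ih =>
    intro cur l h
    have hc := h c (by simp)
    simp only [List.cons_append, finishW, hc, Bool.false_eq_true, if_false]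
    rw [ih (c :: cur) l (fun x hx => h x (by simp [hx]))]
    simp

-- every word finishW produces is nonempty and whitespace-free
theorem finishW_wf (s : List Char) : ∀ cur, (∀ c ∈ cur, PySem.Chars.isspace c = false) →
    ∀ w ∈ finishW cur s, w ≠ [] ∧ ∀ c ∈ w, PySem.Chars.isspace c = false := by
  induction s with
  | nil =>
    intro cur hcur w hw
    by_cases hc : cur.isEmpty
    · simp [finishW, hc] at hw
    · simp [finishW, hc] at hw
      subst hw
      have hne : cur ≠ [] := by simpa using hc
      exact ⟨by simpa using hne, fun c hc' => hcur c (by simpa using hc')⟩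
  | cons c t ih =>
    intro cur hcur w hw
    simp only [finishW] at hw
    by_cases hs : PySem.Chars.isspace c
    · by_cases hc : cur.isEmpty
      · rw [if_pos hs, if_pos hc] at hw
        exact ih [] (by simp) w hw
      · rw [if_pos hs, if_neg hc] at hw
        rcases List.mem_cons.mp hw with rfl | hw'
        · have hne : cur ≠ [] := by simpa using hc
          exact ⟨by simpa using hne, fun x hx => hcur x (by simpa using hx)⟩
        · exact ih [] (by simp) w hw'
    · rw [if_neg hs] at hw
      refine ih (c :: cur) ?_ w hw
      intro x hx
      rcases List.mem_cons.mp hx with rfl | hx'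
      · simpa using hs
      · exact hcur x hx'

-- splitting the single-space join of well-formed words gives the words back
theorem split₀_join_words (ws : List (List Char)) (h : ∀ w ∈ ws, w ≠ [] ∧ ∀ c ∈ w, PySem.Chars.isspace c = false) :
    finishW [] (PySem.Chars.join [' '] ws) = ws := by
  induction ws with
  | nil => rfl
  | cons w ws ih =>
    obtain ⟨hw, hwf⟩ := h w (by simp)
    cases ws with
    | nil =>
      have : PySem.Chars.join [' '] [w] = w := by simp [PySem.Chars.join, List.intercalate]
      rw [this, ← List.append_nil w, finishW_word w [] [] hwf]
      simp [finishW, hw]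
    | cons v vs =>
      have hj : PySem.Chars.join [' '] (w :: v :: vs) = w ++ (' ' :: PySem.Chars.join [' '] (v :: vs)) := by
        simp [PySem.Chars.join, List.intercalate, List.intersperse]
      rw [hj, finishW_word w [] _ hwf]
      have hne : (w.reverse ++ []).isEmpty = false := by simp [List.isEmpty_eq_false_iff, hw]
      simp only [finishW, hne, Bool.false_eq_true, if_false, if_pos (by decide : PySem.Chars.isspace ' ' = true)]
      rw [ih (fun u hu => h u (by simp [hu]))]
      simp

theorem astep_nil_eq_bemit (w : List Char) :
    astep [] w = bemit (w.filter (fun c => PySem.Chars.isalnum c)) := by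
  unfold astep bemit
  by_cases h : ((w.filter (fun c => PySem.Chars.isalnum c)).isEmpty
      || PySem.Chars.strIsdigit (w.filter (fun c => PySem.Chars.isalnum c))) = true
  · rw [if_pos h]
    rw [if_neg (by rcases Bool.or_eq_true .. |>.mp h with h' | h' <;> simp [h'])]
  · rw [if_neg h]
    simp only [Bool.or_eq_true, not_or, Bool.not_eq_true] at h
    rw [if_pos (by simp [h.1, h.2])]
    simp

-- the heart: A's word-then-filter fold equals B's filtering scan
theorem core (cs : List Char) : ∀ cur, afold [] (finishW cur (cs.map pvF)) =
    bfin ((cur.reverse).filter (fun c => PySem.Chars.isalnum c)) (cs.map PySem.Chars.lowerChar) := by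
  induction cs with
  | nil =>
    intro cur
    by_cases hc : cur.isEmpty
    · have : cur = [] := List.isEmpty_iff.mp hc
      subst this; simp [finishW, afold, bfin, bemit]
    · simp only [List.map_nil, finishW, hc, Bool.false_eq_true, if_false, bfin]
      rw [afold_cons, astep_nil_eq_bemit]
      simp [afold]
  | cons c t ih =>
    intro cur
    set d := PySem.Chars.lowerChar c with hd
    by_cases hsep : (PySem.Chars.isspace d || d == '_' || d == '-') = true
    · have hfc : PySem.Chars.isspace (pvF c) = true := by
        simp only [Bool.or_eq_true, beq_iff_eq] at hsep
        rcases hsep with (hs | hu) | hm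
        · have h1 : d ≠ '_' := by rintro h; rw [h] at hs; exact absurd hs (by decide)
          have h2 : d ≠ '-' := by rintro h; rw [h] at hs; exact absurd hs (by decide)
          simpa [pvF, pvSub1, pvSub2, ← hd, h1, h2] using hs
        · simp only [pvF, pvSub1, pvSub2, ← hd, hu, if_pos]
          decide
        · by_cases h1 : d = '_' <;>
            simp only [pvF, pvSub1, pvSub2, ← hd, h1, hm, if_pos] <;>
            decide
      have hbstep : bfin ((cur.reverse).filter (fun c => PySem.Chars.isalnum c)) ((c :: t).map PySem.Chars.lowerChar)
          = bemit ((cur.reverse).filter (fun c => PySem.Chars.isalnum c)) ++ bfin [] (t.map PySem.Chars.lowerChar) := by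
        simp only [List.map_cons, bfin, ← hd, hsep, if_pos]
      rw [hbstep]
      by_cases hc : cur.isEmpty
      · have : cur = [] := List.isEmpty_iff.mp hc
        subst this
        simp only [List.map_cons, finishW, hfc, if_pos, List.isEmpty_nil, List.reverse_nil, List.filter_nil]
        rw [ih []]
        simp [bemit]
      · simp only [List.map_cons, finishW, hfc, if_pos, hc, Bool.false_eq_true, if_false]
        rw [afold_cons, astep_nil_eq_bemit, ih []]
        simp only [List.nil_append, List.reverse_nil, List.filter_nil]
    · have hne1 : d ≠ '_' := by simp only [Bool.or_eq_true, beq_iff_eq] at hsep; tauto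
      have hne2 : d ≠ '-' := by simp only [Bool.or_eq_true, beq_iff_eq] at hsep; tauto
      have hfc : pvF c = d := by simp [pvF, pvSub1, pvSub2, ← hd, hne1, hne2]
      have hds : PySem.Chars.isspace d = false := by
        simp only [Bool.or_eq_true, beq_iff_eq] at hsep; simpa using fun h => hsep (Or.inl (Or.inl h))
      have hbstep : bfin ((cur.reverse).filter (fun c => PySem.Chars.isalnum c)) ((c :: t).map PySem.Chars.lowerChar)
          = if PySem.Chars.isalnum d then bfin ((cur.reverse).filter (fun c => PySem.Chars.isalnum c) ++ [d]) (t.map PySem.Chars.lowerChar)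
            else bfin ((cur.reverse).filter (fun c => PySem.Chars.isalnum c)) (t.map PySem.Chars.lowerChar) := by
        simp only [List.map_cons, bfin, ← hd, hsep, Bool.false_eq_true, if_false]
      rw [hbstep]
      simp only [List.map_cons, finishW, hfc, hds, Bool.false_eq_true, if_false]
      rw [ih (d :: cur)]
      by_cases ha : PySem.Chars.isalnum d
      · simp [ha, List.filter_append]
      · simp [ha, List.filter_append]

-- B's foldl equals the accumulator-free scan
theorem b_foldl_eq (l : List Char) : ∀ (res : List String) (buf : List Char),
    (let fin := l.foldl (fun (st : List String × List Char) (char : Char) =>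
      if PySem.Chars.isspace char || char == '_' || char == '-' then
        ((if !st.2.isEmpty && !PySem.Chars.strIsdigit st.2 then st.1 ++ [String.ofList st.2] else st.1), ([] : List Char))
      else if PySem.Chars.isalnum char then (st.1, st.2 ++ [char])
      else st) (res, buf);
     if !fin.2.isEmpty && !PySem.Chars.strIsdigit fin.2 then fin.1 ++ [String.ofList fin.2] else fin.1)
    = res ++ bfin buf l := by
  induction l with
  | nil =>
    intro res buf
    simp only [List.foldl_nil, bfin, bemit]
    split_ifs <;> simp
  | cons c t ih =>
    intro res buf
    simp only [List.foldl_cons, bfin]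
    by_cases hsep : (PySem.Chars.isspace c || c == '_' || c == '-') = true
    · rw [if_pos hsep] at *
      simp only [hsep, if_pos]
      rw [ih _ []]
      unfold bemit
      split_ifs <;> simp
    · rw [if_neg hsep]
      simp only [hsep, Bool.false_eq_true, if_false]
      by_cases ha : PySem.Chars.isalnum c
      · simp only [ha, if_pos]
        exact ih res (buf ++ [c])
      · simp only [ha, Bool.false_eq_true, if_false]
        exact ih res buf

-- normalize, pushed to the char-list level
theorem normalize_toList (value : String) :
    (normalize_catalog_text_py value).toList
      = PySem.Chars.join [' '] (PySem.Chars.split₀ ((PySem.Chars.strip value.toList).map pvF)) := by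
  have h1 : (PySem.Str.replace (PySem.Str.replace (PySem.Str.lower (PySem.Str.strip value)) "_" " ") "-" " ").toList
      = (PySem.Chars.strip value.toList).map pvF := by
    simp only [PySem.Str.toList_replace, PySem.Str.toList_lower, PySem.Str.toList_strip]
    have h_ : ("_" : String).toList = ['_'] := rfl
    have hsp : (" " : String).toList = [' '] := rfl
    have hmi : ("-" : String).toList = ['-'] := rfl
    rw [h_, hsp, hmi, replace_single, replace_single]
    simp only [PySem.Chars.lower, List.map_map]
    rfl
  simp only [normalize_catalog_text_py]
  rw [PySem.Str.toList_join]
  have hsp : (" " : String).toList = [' '] := rfl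
  rw [hsp, PySem.Str.split₀_map_toList, h1]

theorem strip_elim (cs : List Char) :
    finishW [] ((PySem.Chars.strip cs).map pvF) = finishW [] (cs.map pvF) := by
  have hd1 : cs = cs.takeWhile PySem.Chars.isspace ++ PySem.Chars.lstrip cs :=
    (List.takeWhile_append_dropWhile).symm
  have hd2 : PySem.Chars.lstrip cs
      = PySem.Chars.strip cs ++ ((PySem.Chars.lstrip cs).reverse.takeWhile PySem.Chars.isspace).reverse := by
    simp only [PySem.Chars.strip, PySem.Chars.rstrip]
    have h := congrArg List.reverse
      (List.takeWhile_append_dropWhile (p := PySem.Chars.isspace) (l := (PySem.Chars.lstrip cs).reverse))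
    simp only [List.reverse_append, List.reverse_reverse] at h
    exact h.symm
  have hsp1 : ∀ c ∈ (cs.takeWhile PySem.Chars.isspace).map pvF, PySem.Chars.isspace c = true := by
    intro c hc
    obtain ⟨x, hx, rfl⟩ := List.mem_map.mp hc
    have hxs : PySem.Chars.isspace x = true := List.mem_takeWhile_imp hx
    rw [pvF_of_isspace x hxs]; exact hxs
  have hsp2 : ∀ c ∈ (((PySem.Chars.lstrip cs).reverse.takeWhile PySem.Chars.isspace).reverse).map pvF,
      PySem.Chars.isspace c = true := by
    intro c hc
    obtain ⟨x, hx, rfl⟩ := List.mem_map.mp hc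
    have hxs : PySem.Chars.isspace x = true := List.mem_takeWhile_imp (List.mem_reverse.mp hx)
    rw [pvF_of_isspace x hxs]; exact hxs
  conv_rhs => rw [hd1, hd2]
  rw [List.map_append, finishW_leading_spaces _ _ hsp1, List.map_append,
    finishW_trailing_spaces _ _ _ hsp2]

-- ===== VERDICT (by name: the statement is the Claim_ definition above) =====
theorem catalog_sequence_tokens_py_spec : Claim_equal_catalog_sequence_tokens_py := by
  intro value _
  show catalog_sequence_tokens_py value = catalog_sequence_tokens_py_alt value
  have hA : catalog_sequence_tokens_py value
      = afold [] ((PySem.Str.split₀ (normalize_catalog_text_py value)).map String.toList) := by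
    simp only [catalog_sequence_tokens_py, afold, List.foldl_map]
    rfl
  rw [hA, PySem.Str.split₀_map_toList, normalize_toList, split₀_eq_finishW, split₀_eq_finishW,
    split₀_join_words _ (finishW_wf _ [] (by simp)), strip_elim, core]
  have hB : catalog_sequence_tokens_py_alt value = [] ++ bfin [] ((PySem.Str.lower value).toList) := by
    simpa only [catalog_sequence_tokens_py_alt] using b_foldl_eq (PySem.Str.lower value).toList [] []
  rw [hB, PySem.Str.toList_lower]
  simp [PySem.Chars.lower]
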